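-- pv_equiv track=rewrite | github.com/MrBrantCode/unitest_baseline | mut_generate/mist_train_cf/cf_69277/solution.py | prime_fibonacci_indexes
-- ===== SOURCE A (Python) =====
-- def prime_fibonacci_indexes(n):
--     def is_prime(num):
--         if num <= 1:
--             return False
--         if num == 2:
--             return True
--         if num % 2 == 0:
--             return False
--
--         i = 3
--         while i * i <= num:
--             if num % i == 0:
--                 return False
--             i += 2
--
--         return True
--
--     fib_sequence = [0, 1]
--     while len(fib_sequence) < n:
--         fib_sequence.append(fib_sequence[-1] + fib_sequence[-2])
--
--     return [(i, fib_sequence[i]) for i in range(n) if is_prime(fib_sequence[i])]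
-- ===== SOURCE B (Python) =====
-- def prime_fibonacci_indexes(n):
--     # Number-theoretic shortcut: fib(d) divides fib(k) whenever d divides k, so any
--     # composite index k other than the single exceptional index four has a divisor d
--     # with 3 <= d < k, giving fib(k) the proper divisor fib(d); hence fib(k) is
--     # composite there and only the values at prime indexes (plus that one exceptional
--     # index) need a primality test, which B performs with a six-step wheel.
--     def is_prime(num):
--         if num < 2:
--             return False
--         if num % 2 == 0 or num % 3 == 0:
--             return num == 2 or num == 3
--         d = 5
--         while d * d <= num:
--             if num % d == 0 or num % (d + 2) == 0:
--                 return False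
--             d += 6
--         return True
--
--     out = []
--     a, b = 0, 1
--     for i in range(n):
--         if (i == 4 or is_prime(i)) and is_prime(a):
--             out.append((i, a))
--         a, b = b, a + b
--     return out
-- ===== Notes on version B (the rewrite author's own statement) =====
-- stated objective: alternative
-- what changed: B exploits the divisibility law of Fibonacci numbers (fib(d) divides fib(k) whenever d divides k): at every composite index other than the single exceptional index four the Fibonacci value is therefore composite and B skips its primality test entirely, trial-dividing with a six-step wheel only the values at prime indexes, and it streams the Fibonacci pair instead of materialising the whole list.
import Mathlib
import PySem

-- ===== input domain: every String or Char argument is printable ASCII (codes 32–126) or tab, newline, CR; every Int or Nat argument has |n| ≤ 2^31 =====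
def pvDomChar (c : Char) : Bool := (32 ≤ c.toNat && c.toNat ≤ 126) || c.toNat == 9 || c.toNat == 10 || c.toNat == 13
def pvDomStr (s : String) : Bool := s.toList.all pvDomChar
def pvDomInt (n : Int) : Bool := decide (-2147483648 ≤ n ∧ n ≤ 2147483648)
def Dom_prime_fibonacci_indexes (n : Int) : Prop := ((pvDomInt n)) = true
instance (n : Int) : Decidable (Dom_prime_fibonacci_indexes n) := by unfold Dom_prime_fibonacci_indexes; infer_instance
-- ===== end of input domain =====

-- B skips the primality test at every composite index except the exceptional index four
-- (fib d ∣ fib k for d ∣ k makes those Fibonacci values composite), tests the remaining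
-- values with a six-step wheel, and streams the Fibonacci pair instead of storing the list.

-- ===== PORT A =====
-- A's inner while loop: i starts at 3 and steps by 2 (the 3 ≤ i argument only carries termination)
def aTrialLoop (num i : Int) (hi : 3 ≤ i) : Bool :=
  if h : i * i ≤ num then
    if PySem.Int.mod num i == 0 then false
    else aTrialLoop num (i + 2) (by omega)
  else true
termination_by (num - i).toNat
decreasing_by
  have h3 : 3 * i ≤ i * i := by nlinarith
  omega

def aIsPrime (num : Int) : Bool :=
  if num ≤ 1 then false
  else if num == 2 then true
  else if PySem.Int.mod num 2 == 0 then false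
  else aTrialLoop num 3 (by norm_num)

-- A's fib_sequence while loop (appends fib[-1] + fib[-2]; the list always has ≥ 2 elements
-- at the call site, so the .getD 0 defaults are never taken)
def aFibLoop (n : Int) (xs : List Int) : List Int :=
  if h : (xs.length : Int) < n then
    aFibLoop n (xs ++ [((PySem.List.pyGet? xs (-1)).getD 0) + ((PySem.List.pyGet? xs (-2)).getD 0)])
  else xs
termination_by (n - xs.length).toNat
decreasing_by simp; omega

def prime_fibonacci_indexes (n : Int) : List (List Int) :=
  let fibs := aFibLoop n [0, 1]
  (PySem.List.pyRange 0 n 1).flatMap (fun i =>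
    match PySem.List.pyGet? fibs i with
    | some v => if aIsPrime v then [[i, v]] else []
    | none => [])

-- ===== PORT B =====
-- B's 6k±1 wheel loop: d = 5, 11, 17, …, testing d and d+2
def bWheelLoop (num d : Int) (hd : 5 ≤ d) : Bool :=
  if h : d * d ≤ num then
    if PySem.Int.mod num d == 0 || PySem.Int.mod num (d + 2) == 0 then false
    else bWheelLoop num (d + 6) (by omega)
  else true
termination_by (num - d).toNat
decreasing_by
  have h5 : 5 * d ≤ d * d := by nlinarith
  omega

def bIsPrime (num : Int) : Bool :=
  if num < 2 then false
  else if PySem.Int.mod num 2 == 0 || PySem.Int.mod num 3 == 0 then (num == 2 || num == 3)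
  else bWheelLoop num 5 (by norm_num)

def bGo (n a b i : Int) : List (List Int) :=
  if h : i < n then
    (if (i == 4 || bIsPrime i) && bIsPrime a then [[i, a]] else []) ++ bGo n b (a + b) (i + 1)
  else []
termination_by (n - i).toNat
decreasing_by omega

def prime_fibonacci_indexes_alt (n : Int) : List (List Int) := bGo n 0 1 0

-- ===== PRECONDITION & SPEC =====
def Spec_prime_fibonacci_indexes (n : Int) (out : List (List Int)) : Prop := out = prime_fibonacci_indexes_alt n
instance (n : Int) (out : List (List Int)) : Decidable (Spec_prime_fibonacci_indexes n out) := by unfold Spec_prime_fibonacci_indexes; infer_instance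

-- ===== CLAIM =====
def Claim_equal_prime_fibonacci_indexes : Prop := ∀ (n : Int), Dom_prime_fibonacci_indexes n → Spec_prime_fibonacci_indexes n (prime_fibonacci_indexes n)

-- ===== LEMMAS AND PROOFS =====

-- the Fibonacci sequence the two programs compute
def fibI : Nat → Int
  | 0 => 0
  | 1 => 1
  | (k + 2) => fibI k + fibI (k + 1)

def fibList (k : Nat) : List Int := (List.range k).map fibI

theorem fibI_eq_fib : ∀ k, fibI k = (Nat.fib k : Int)
  | 0 => rfl
  | 1 => rfl
  | (k + 2) => by
    rw [fibI, fibI_eq_fib k, fibI_eq_fib (k + 1), Nat.fib_add_two]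
    push_cast
    ring

theorem fibI_nonneg (k : Nat) : 0 ≤ fibI k := by
  rw [fibI_eq_fib]; positivity

-- an Int divisor strictly between 1 and num refutes primality of num.toNat
theorem not_prime_of_int_divisor (num e : Int) (h0 : 0 ≤ num) (he : 2 ≤ e) (hlt : e < num)
    (hd : e ∣ num) : ¬ (num.toNat).Prime := by
  intro hp
  have h1 : e.toNat ∣ num.toNat := by
    rwa [← Int.toNat_of_nonneg (show (0:ℤ) ≤ e by omega), ← Int.toNat_of_nonneg h0,
      Int.natCast_dvd_natCast] at hd
  rcases hp.eq_one_or_self_of_dvd _ h1 with h | h <;> omega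

-- a composite num ≥ 2 has a prime divisor p with p*p ≤ num (Int form)
theorem exists_small_prime_factor (num : Int) (h2 : 2 ≤ num) (hnp : ¬ (num.toNat).Prime) :
    ∃ p : Int, 2 ≤ p ∧ p ∣ num ∧ p * p ≤ num ∧ (p.toNat).Prime := by
  have h0 : 0 < num.toNat := by omega
  have hne : num.toNat ≠ 1 := by omega
  refine ⟨(num.toNat.minFac : Int), ?_, ?_, ?_, ?_⟩
  · exact_mod_cast (Nat.minFac_prime hne).two_le
  · have := Nat.minFac_dvd num.toNat
    have : ((num.toNat.minFac : ℤ)) ∣ ((num.toNat : ℤ)) := Int.natCast_dvd_natCast.mpr this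
    rwa [Int.toNat_of_nonneg (by omega)] at this
  · have := Nat.minFac_sq_le_self h0 hnp
    rw [pow_two] at this
    have : ((num.toNat.minFac * num.toNat.minFac : ℕ) : ℤ) ≤ ((num.toNat : ℤ)) := by
      exact_mod_cast this
    rw [Int.toNat_of_nonneg (by omega)] at this
    push_cast at this
    exact this
  · simpa using Nat.minFac_prime hne

-- ---- A's is_prime computes primality ----

theorem aTrialLoop_true_of_prime (num : Int) (hp : (num.toNat).Prime) :
    ∀ (k : Nat) (i : Int) (hi : 3 ≤ i), (num - i).toNat ≤ k → aTrialLoop num i hi = true := by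
  intro k
  induction k with
  | zero =>
    intro i hi hk
    rw [aTrialLoop]
    have hni : num ≤ i := by omega
    have : ¬ i * i ≤ num := by nlinarith
    simp [this]
  | succ k ih =>
    intro i hi hk
    rw [aTrialLoop]
    by_cases h : i * i ≤ num
    · have hilt : i < num := by nlinarith
      have hmod : ¬ (PySem.Int.mod num i == 0) = true := by
        simp only [beq_iff_eq]
        intro h0
        exact not_prime_of_int_divisor num i (by omega) (by omega) hilt
          ((PySem.Int.mod_eq_zero_iff_dvd num i).mp h0) hp
      simp only [h, dite_true, hmod, Bool.false_eq_true, if_false]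
      exact ih (i + 2) (by omega) (by omega)
    · simp [h]

theorem aTrialLoop_false_of_factor (num p : Int) (hpd : p ∣ num) (hpp : p * p ≤ num)
    (hpo : ¬ (2 ∣ p)) :
    ∀ (k : Nat) (i : Int) (hi : 3 ≤ i), ¬ (2 ∣ i) → i ≤ p → (p - i).toNat ≤ k →
      aTrialLoop num i hi = false := by
  intro k
  induction k with
  | zero =>
    intro i hi hio hip hk
    have : i = p := by omega
    subst this
    rw [aTrialLoop]
    have h1 : i * i ≤ num := hpp
    have h2 : (PySem.Int.mod num i == 0) = true := by
      simp only [beq_iff_eq]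
      exact (PySem.Int.mod_eq_zero_iff_dvd num i).mpr hpd
    simp [h1, h2]
  | succ k ih =>
    intro i hi hio hip hk
    rw [aTrialLoop]
    have h1 : i * i ≤ num := by nlinarith
    by_cases hm : (PySem.Int.mod num i == 0) = true
    · simp [h1, hm]
    · have hne : i ≠ p := by
        intro h; subst h
        exact hm (by simp only [beq_iff_eq]; exact (PySem.Int.mod_eq_zero_iff_dvd num i).mpr hpd)
      simp only [h1, dite_true, hm, Bool.false_eq_true, if_false]
      exact ih (i + 2) (by omega) (by omega) (by omega) (by omega)

theorem aIsPrime_iff (num : Int) (h0 : 0 ≤ num) : aIsPrime num = true ↔ (num.toNat).Prime := by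
  rw [aIsPrime]
  by_cases h1 : num ≤ 1
  · simp only [h1, if_true, Bool.false_eq_true, false_iff]
    intro hp; have := hp.two_le; omega
  by_cases h2 : num = 2
  · subst h2; decide
  simp only [h1, if_false, show ¬ (num == 2) = true by simp [h2], Bool.false_eq_true, if_false]
  by_cases hm : (PySem.Int.mod num 2 == 0) = true
  · simp only [hm, if_true, Bool.false_eq_true, false_iff]
    have hdvd : (2:ℤ) ∣ num := (PySem.Int.mod_eq_zero_iff_dvd num 2).mp (by simpa using hm)
    exact not_prime_of_int_divisor num 2 h0 le_rfl (by omega) hdvd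
  · have hodd : ¬ (2:ℤ) ∣ num := fun h =>
      hm (by simp only [beq_iff_eq]; exact (PySem.Int.mod_eq_zero_iff_dvd num 2).mpr h)
    simp only [hm, Bool.false_eq_true, if_false]
    constructor
    · intro hloop
      by_contra hnp
      obtain ⟨p, hp2, hpd, hpp, hpprime⟩ := exists_small_prime_factor num (by omega) hnp
      have hpo : ¬ (2 ∣ p) := fun h => hodd (h.trans hpd)
      have hp3 : 3 ≤ p := by omega
      have := aTrialLoop_false_of_factor num p hpd hpp hpo (p - 3).toNat 3 (by norm_num)
        (by omega) hp3 (by omega)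
      rw [this] at hloop
      exact Bool.false_ne_true hloop
    · intro hp
      exact aTrialLoop_true_of_prime num hp (num - 3).toNat 3 (by norm_num) (by omega)

-- ---- B's is_prime computes primality ----

theorem bWheelLoop_true_of_prime (num : Int) (hp : (num.toNat).Prime) (h5 : 5 ≤ num) :
    ∀ (k : Nat) (d : Int) (hd : 5 ≤ d), (num - d).toNat ≤ k → bWheelLoop num d hd = true := by
  intro k
  induction k with
  | zero =>
    intro d hd hk
    rw [bWheelLoop]
    have hnd : num ≤ d := by omega
    have : ¬ d * d ≤ num := by nlinarith
    simp [this]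
  | succ k ih =>
    intro d hd hk
    rw [bWheelLoop]
    by_cases h : d * d ≤ num
    · have hdlt : d < num := by nlinarith
      have hd2lt : d + 2 < num := by nlinarith
      have hmod : ¬ (PySem.Int.mod num d == 0 || PySem.Int.mod num (d + 2) == 0) = true := by
        simp only [Bool.or_eq_true, beq_iff_eq]
        rintro (h0 | h0)
        · exact not_prime_of_int_divisor num d (by omega) (by omega) hdlt
            ((PySem.Int.mod_eq_zero_iff_dvd num d).mp h0) hp
        · exact not_prime_of_int_divisor num (d + 2) (by omega) (by omega) hd2lt
            ((PySem.Int.mod_eq_zero_iff_dvd num (d + 2)).mp h0) hp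
      simp only [h, dite_true, hmod, Bool.false_eq_true, if_false]
      exact ih (d + 6) (by omega) (by omega)
    · simp [h]

theorem bWheelLoop_false_of_factor (num p : Int) (hpd : p ∣ num) (hpp : p * p ≤ num)
    (hpm : p % 6 = 1 ∨ p % 6 = 5) :
    ∀ (k : Nat) (d : Int) (hd : 5 ≤ d), d % 6 = 5 → d ≤ p → (p - d).toNat ≤ k →
      bWheelLoop num d hd = false := by
  intro k
  induction k with
  | zero =>
    intro d hd hdm hdp hk
    have : d = p := by omega
    subst this
    rw [bWheelLoop]
    have h1 : d * d ≤ num := hpp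
    have h2 : (PySem.Int.mod num d == 0 || PySem.Int.mod num (d + 2) == 0) = true := by
      simp only [Bool.or_eq_true, beq_iff_eq]
      exact Or.inl ((PySem.Int.mod_eq_zero_iff_dvd num d).mpr hpd)
    simp [h1, h2]
  | succ k ih =>
    intro d hd hdm hdp hk
    rw [bWheelLoop]
    have h1 : d * d ≤ num := by nlinarith
    by_cases hm : (PySem.Int.mod num d == 0 || PySem.Int.mod num (d + 2) == 0) = true
    · simp [h1, hm]
    · have hne1 : p ≠ d := by
        intro h; apply hm
        simp only [Bool.or_eq_true, beq_iff_eq]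
        exact Or.inl ((PySem.Int.mod_eq_zero_iff_dvd num d).mpr (h ▸ hpd))
      have hne2 : p ≠ d + 2 := by
        intro h; apply hm
        simp only [Bool.or_eq_true, beq_iff_eq]
        exact Or.inr ((PySem.Int.mod_eq_zero_iff_dvd num (d + 2)).mpr (h ▸ hpd))
      have hstep : d + 6 ≤ p := by omega
      simp only [h1, dite_true, hm, Bool.false_eq_true, if_false]
      exact ih (d + 6) (by omega) (by omega) hstep (by omega)

theorem bIsPrime_iff (num : Int) (h0 : 0 ≤ num) : bIsPrime num = true ↔ (num.toNat).Prime := by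
  rw [bIsPrime]
  by_cases h1 : num < 2
  · simp only [h1, if_true, Bool.false_eq_true, false_iff]
    intro hp; have := hp.two_le; omega
  by_cases hm : (PySem.Int.mod num 2 == 0 || PySem.Int.mod num 3 == 0) = true
  · simp only [h1, if_false, hm, if_true]
    by_cases h23 : num = 2 ∨ num = 3
    · rcases h23 with h | h <;> subst h <;> simp <;> decide
    · have hnum : ¬ (num == 2 || num == 3) = true := by
        simp only [Bool.or_eq_true, beq_iff_eq]; exact h23
      simp only [hnum, Bool.false_eq_true, false_iff]
      have : (2:ℤ) ∣ num ∨ (3:ℤ) ∣ num := by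
        rcases (by simpa only [Bool.or_eq_true, beq_iff_eq] using hm : PySem.Int.mod num 2 = 0 ∨ PySem.Int.mod num 3 = 0) with h | h
        · exact Or.inl ((PySem.Int.mod_eq_zero_iff_dvd num 2).mp h)
        · exact Or.inr ((PySem.Int.mod_eq_zero_iff_dvd num 3).mp h)
      rcases this with h | h
      · exact not_prime_of_int_divisor num 2 h0 le_rfl (by omega) h
      · exact not_prime_of_int_divisor num 3 h0 (by norm_num) (by omega) h
  · have hnd : ¬ (2:ℤ) ∣ num ∧ ¬ (3:ℤ) ∣ num := by
      constructor <;> intro h <;> apply hm <;> simp only [Bool.or_eq_true, beq_iff_eq]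
      · exact Or.inl ((PySem.Int.mod_eq_zero_iff_dvd num 2).mpr h)
      · exact Or.inr ((PySem.Int.mod_eq_zero_iff_dvd num 3).mpr h)
    have h5 : 5 ≤ num := by omega
    simp only [h1, if_false, hm, Bool.false_eq_true, if_false]
    constructor
    · intro hloop
      by_contra hnp
      obtain ⟨p, hp2, hpd, hpp, hpprime⟩ := exists_small_prime_factor num (by omega) hnp
      have hpo : ¬ (2 ∣ p) := fun h => hnd.1 (h.trans hpd)
      have hpt : ¬ (3 ∣ p) := fun h => hnd.2 (h.trans hpd)
      have hpm : p % 6 = 1 ∨ p % 6 = 5 := by omega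
      have hp5 : 5 ≤ p := by omega
      have := bWheelLoop_false_of_factor num p hpd hpp hpm (p - 5).toNat 5 (by norm_num)
        (by norm_num) hp5 (by omega)
      rw [this] at hloop
      exact Bool.false_ne_true hloop
    · intro hp
      exact bWheelLoop_true_of_prime num hp h5 (num - 5).toNat 5 (by norm_num) (by omega)

-- ---- the index shortcut: fib of a composite index ≠ 4 is composite ----

theorem exists_mid_divisor (k : Nat) (h2 : 2 ≤ k) (hnp : ¬ k.Prime) (h4 : k ≠ 4) :
    ∃ d, d ∣ k ∧ 3 ≤ d ∧ d < k := by
  have hne : k ≠ 1 := by omega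
  have hp := Nat.minFac_prime hne
  have hpd := Nat.minFac_dvd k
  have hplt : k.minFac < k :=
    lt_of_le_of_ne (Nat.le_of_dvd (by omega) hpd) (fun h => hnp (h ▸ hp))
  by_cases h3 : 3 ≤ k.minFac
  · exact ⟨k.minFac, hpd, h3, hplt⟩
  · have hp2 : k.minFac = 2 := by have := hp.two_le; omega
    obtain ⟨m, hm⟩ := hp2 ▸ hpd
    have hk2 : k ≠ 2 := fun h => hnp (h ▸ Nat.prime_two)
    have hk6 : 6 ≤ k := by omega
    exact ⟨m, ⟨2, by omega⟩, by omega, by omega⟩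

theorem fib_not_prime (k : Nat) (hnp : ¬ k.Prime) (h4 : k ≠ 4) : ¬ (Nat.fib k).Prime := by
  by_cases h2 : 2 ≤ k
  · obtain ⟨d, hd, h3, hlt⟩ := exists_mid_divisor k h2 hnp h4
    intro hP
    have hdvd : Nat.fib d ∣ Nat.fib k := Nat.fib_dvd d k hd
    have h2d : 2 ≤ Nat.fib d := by
      have := Nat.fib_mono h3
      simpa using this
    have hlt2 : Nat.fib d < Nat.fib k := by
      obtain ⟨j, rfl⟩ : ∃ j, k = j + 2 := ⟨k - 2, by omega⟩
      have hdj : Nat.fib d ≤ Nat.fib (j + 1) := Nat.fib_mono (by omega)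
      have hj : 0 < Nat.fib j := Nat.fib_pos.mpr (by omega)
      rw [Nat.fib_add_two]
      omega
    rcases hP.eq_one_or_self_of_dvd _ hdvd with h | h <;> omega
  · interval_cases k
    · decide
    · decide

-- ---- per-index agreement of the two filters ----

theorem cond_eq (i : Int) (h0 : 0 ≤ i) :
    aIsPrime (fibI i.toNat) = ((i == 4 || bIsPrime i) && bIsPrime (fibI i.toNat)) := by
  have hv0 : 0 ≤ fibI i.toNat := fibI_nonneg _
  have hvt : (fibI i.toNat).toNat = Nat.fib i.toNat := by
    rw [fibI_eq_fib]; exact Int.toNat_natCast _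
  by_cases hg : (i == 4 || bIsPrime i) = true
  · simp only [hg, Bool.true_and]
    rcases Bool.eq_false_or_eq_true (bIsPrime (fibI i.toNat)) with hb | hb
    · rw [hb, (aIsPrime_iff _ hv0).mpr ((bIsPrime_iff _ hv0).mp hb)]
    · rcases Bool.eq_false_or_eq_true (aIsPrime (fibI i.toNat)) with ha | ha
      · exfalso
        have hbt := (bIsPrime_iff _ hv0).mpr ((aIsPrime_iff _ hv0).mp ha)
        rw [hb] at hbt
        exact absurd hbt (by decide)
      · rw [ha, hb]
  · have hg' : ¬ i = 4 ∧ bIsPrime i = false := by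
      simpa only [Bool.or_eq_true, beq_iff_eq, not_or, Bool.not_eq_true] using hg
    have hnpi : ¬ (i.toNat).Prime := by
      intro hp
      have hbt := (bIsPrime_iff i h0).mpr hp
      rw [hg'.2] at hbt
      exact absurd hbt (by decide)
    have h4 : i.toNat ≠ 4 := by omega
    have hnf : ¬ (Nat.fib i.toNat).Prime := fib_not_prime _ hnpi h4
    have ha : aIsPrime (fibI i.toNat) = false := by
      rcases Bool.eq_false_or_eq_true (aIsPrime (fibI i.toNat)) with h | h
      · exact absurd ((aIsPrime_iff _ hv0).mp h) (hvt ▸ hnf)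
      · exact h
    rw [ha, Bool.eq_false_iff.mpr hg, Bool.false_and]

-- ---- the two loops produce the same filtered list ----

theorem length_fibList (i : Nat) : (fibList i).length = i := by
  simp [fibList]

theorem fibList_snoc (i : Nat) (h : 2 ≤ i) :
    fibList i ++ [fibI (i - 1) + fibI (i - 2)] = fibList (i + 1) := by
  obtain ⟨m, rfl⟩ : ∃ m, i = m + 2 := ⟨i - 2, by omega⟩
  simp only [fibList, List.range_succ (n := m + 2), List.map_append, List.map_cons, List.map_nil]
  have : fibI (m + 2) = fibI m + fibI (m + 1) := by rw [fibI]
  simp [this, show m + 2 - 1 = m + 1 from by omega, add_comm]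

theorem fibLoop_eq (n : Int) : ∀ (k i : Nat), 2 ≤ i → (n - i).toNat ≤ k →
    aFibLoop n (fibList i) = fibList (max i n.toNat) := by
  intro k
  induction k with
  | zero =>
    intro i hi hk
    rw [aFibLoop]
    rw [dif_neg (by rw [length_fibList]; omega)]
    congr 1
    omega
  | succ k ih =>
    intro i hi hk
    by_cases h : (i : Int) < n
    · rw [aFibLoop]
      rw [dif_pos (by rw [length_fibList]; exact_mod_cast h)]
      have e1 : PySem.List.pyGet? (fibList i) (-1) = some (fibI (i - 1)) := by
        rw [PySem.List.pyGet?_neg_ofNat (fibList i) 1 (by norm_num) (by rw [length_fibList]; omega)]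
        simp [fibList, show i - 1 < i from by omega]
      have e2 : PySem.List.pyGet? (fibList i) (-2) = some (fibI (i - 2)) := by
        rw [PySem.List.pyGet?_neg_ofNat (fibList i) 2 (by norm_num) (by rw [length_fibList]; omega)]
        simp [fibList, show i - 2 < i from by omega]
      rw [e1, e2]
      simp only [Option.getD_some]
      rw [fibList_snoc i hi]
      rw [ih (i + 1) (by omega) (by omega)]
      congr 1
      omega
    · rw [aFibLoop]
      rw [dif_neg (by rw [length_fibList]; exact_mod_cast h)]
      congr 1
      omega

theorem bGo_eq (n : Int) : ∀ (k : Nat) (j : Nat), (n - j).toNat ≤ k →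
    bGo n (fibI j) (fibI (j + 1)) (j : Int) =
      (PySem.List.pyRange (j : Int) n 1).flatMap
        (fun i => if ((i == 4 || bIsPrime i) && bIsPrime (fibI i.toNat)) then [[i, fibI i.toNat]] else []) := by
  intro k
  induction k with
  | zero =>
    intro j hk
    rw [bGo, dif_neg (by omega), PySem.List.pyRange_one_eq_nil (by omega)]
    simp
  | succ k ih =>
    intro j hk
    by_cases h : (j : Int) < n
    · rw [bGo, dif_pos h, PySem.List.pyRange_one_cons h, List.flatMap_cons]
      simp only [Int.toNat_natCast]
      congr 1
      rw [show fibI j + fibI (j + 1) = fibI (j + 1 + 1) from by rw [fibI]]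
      have hb := ih (j + 1) (by omega)
      push_cast at hb
      exact hb
    · rw [bGo, dif_neg h, PySem.List.pyRange_one_eq_nil (by omega)]
      simp

theorem flatMap_congr_mem {α β : Type} (l : List α) (f g : α → List β)
    (h : ∀ x ∈ l, f x = g x) : l.flatMap f = l.flatMap g := by
  induction l with
  | nil => rfl
  | cons x xs ih =>
    rw [List.flatMap_cons, List.flatMap_cons, h x (by simp), ih (fun y hy => h y (by simp [hy]))]

-- ===== VERDICT =====
theorem prime_fibonacci_indexes_spec : Claim_equal_prime_fibonacci_indexes := by
  intro n _
  unfold Spec_prime_fibonacci_indexes prime_fibonacci_indexes prime_fibonacci_indexes_alt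
  have h01 : ([0, 1] : List Int) = fibList 2 := by decide
  rw [h01, fibLoop_eq n (n - 2).toNat 2 le_rfl (by omega)]
  have hb := bGo_eq n n.toNat 0 (by omega)
  norm_num [show fibI 0 = 0 from rfl, show fibI 1 = 1 from rfl] at hb
  rw [hb]
  apply flatMap_congr_mem
  intro i hi
  rw [PySem.List.mem_pyRange_one] at hi
  have hlt : i.toNat < max 2 n.toNat := by omega
  rw [PySem.List.pyGet?_of_nonneg _ hi.1]
  simp only [fibList, List.getElem?_map, List.getElem?_range, hlt, Option.map_some]
  rw [cond_eq i hi.1]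
  simp only [Bool.and_eq_true, Bool.or_eq_true, beq_iff_eq]
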